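-- pv_equiv track=rewrite | github.com/rvkrishna13/transfi-rag | core/scraper.py | deduplicate_sub_pages
-- ===== SOURCE A (Python) =====
-- from typing import List, Dict, Optional, Set
--
-- def deduplicate_sub_pages(all_sub_pages: List[Dict[str, str]]) -> List[Dict[str, str]]:
--     """Remove duplicate URLs, preferring entries with descriptions."""
--     seen_urls = {}
--
--     for sub_page in all_sub_pages:
--         url = sub_page['url']
--
--         if url not in seen_urls:
--             seen_urls[url] = sub_page
--         elif sub_page['short_description'] and not seen_urls[url]['short_description']:
--             seen_urls[url] = sub_page
--
--     return list(seen_urls.values())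
-- ===== SOURCE B (Python) =====
-- def deduplicate_sub_pages(all_sub_pages):
--     """Remove duplicate URLs, preferring entries with descriptions.
--
--     Group-then-select: bucket every entry under its url (first-occurrence
--     key order), then pick from each bucket the first entry with a
--     description, falling back to the bucket's first entry."""
--     groups = {}
--     for sub_page in all_sub_pages:
--         groups.setdefault(sub_page['url'], []).append(sub_page)
--     return [next((e for e in group if e['short_description']), group[0])
--             for group in groups.values()]
-- ===== Notes on version B (the rewrite author's own statement) =====
-- stated objective: alternative
-- what changed: A keeps a single running representative per url and conditionally replaces it inline; B first groups all entries per url into an ordered dict of buckets and then selects from each bucket the first description-bearing entry (falling back to the bucket's first entry) in a second pass.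
-- outside the precondition, e.g. on deduplicate_sub_pages([{'url': 'a'}]): A returns [{'url': 'a'}], B raises KeyError
import Mathlib
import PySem

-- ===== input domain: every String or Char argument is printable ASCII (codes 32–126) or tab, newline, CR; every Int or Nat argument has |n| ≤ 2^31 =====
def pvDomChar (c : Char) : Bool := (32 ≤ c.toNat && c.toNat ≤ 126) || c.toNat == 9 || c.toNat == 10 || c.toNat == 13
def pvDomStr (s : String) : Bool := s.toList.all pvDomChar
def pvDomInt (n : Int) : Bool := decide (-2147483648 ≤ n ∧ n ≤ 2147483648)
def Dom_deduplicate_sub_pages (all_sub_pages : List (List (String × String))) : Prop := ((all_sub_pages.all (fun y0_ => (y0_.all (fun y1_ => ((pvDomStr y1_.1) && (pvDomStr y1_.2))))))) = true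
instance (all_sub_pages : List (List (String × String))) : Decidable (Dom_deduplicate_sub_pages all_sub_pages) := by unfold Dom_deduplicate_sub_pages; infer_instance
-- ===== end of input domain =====

-- B re-implements A as group-all-entries-per-url then select-per-bucket (two passes)
-- instead of A's single pass with a conditionally replaced running representative;
-- equal cost, different decomposition.

-- ===== PORT A =====
-- sub_page[k]: inside Pre_ the key is always present, so getD "" is exactly Python's lookup.
def pvGet (e : List (String × String)) (k : String) : String := (PySem.Dict.mk e).getD k ""

-- the body of A's for-loop
def pvStepA (seen : PySem.Dict String (List (String × String)))
    (sub_page : List (String × String)) : PySem.Dict String (List (String × String)) :=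
  let url := pvGet sub_page "url"
  if seen.contains url = false then seen.insert url sub_page
  else if pvGet sub_page "short_description" ≠ "" ∧ pvGet (seen.getD url []) "short_description" = "" then
    seen.insert url sub_page
  else seen

def deduplicate_sub_pages (all_sub_pages : List (List (String × String))) : List (List (String × String)) :=
  (all_sub_pages.foldl pvStepA PySem.Dict.empty).values

-- ===== PORT B =====
-- e['short_description'] is truthy
def pvHasDesc (e : List (String × String)) : Bool := pvGet e "short_description" != ""

-- next((e for e in group if e['short_description']), group[0]); buckets are never empty,
-- so headD [] is exactly group[0] inside Pre_.
def pvSelect (group : List (List (String × String))) : List (String × String) :=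
  match group.find? pvHasDesc with
  | some e => e
  | none => group.headD []

-- groups.setdefault(sub_page['url'], []).append(sub_page)
def pvStepB (groups : PySem.Dict String (List (List (String × String))))
    (sub_page : List (String × String)) : PySem.Dict String (List (List (String × String))) :=
  groups.modify (pvGet sub_page "url") [] (· ++ [sub_page])

def deduplicate_sub_pages_alt (all_sub_pages : List (List (String × String))) : List (List (String × String)) :=
  ((all_sub_pages.foldl pvStepB PySem.Dict.empty).values).map pvSelect

-- ===== PRECONDITION & SPEC =====
-- Pre_ excludes pages missing a 'url' or 'short_description' key: on those the Python A
-- raises KeyError or (when the page is a url's only/first occurrence) returns by accident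
-- of never reaching the 'short_description' lookup, and B's selection pass raises KeyError there.
def Pre_deduplicate_sub_pages (all_sub_pages : List (List (String × String))) : Prop :=
  ∀ p ∈ all_sub_pages, (PySem.Dict.mk p).contains "url" = true ∧ (PySem.Dict.mk p).contains "short_description" = true
instance (all_sub_pages : List (List (String × String))) : Decidable (Pre_deduplicate_sub_pages all_sub_pages) := by
  unfold Pre_deduplicate_sub_pages; infer_instance

def pvWitness_deduplicate_sub_pages : (List (List (String × String))) :=
  [[("url", "a"), ("short_description", "")], [("url", "a"), ("short_description", "x")], [("url", "b"), ("short_description", "")]]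

def Spec_deduplicate_sub_pages (all_sub_pages : List (List (String × String))) (out : List (List (String × String))) : Prop := out = deduplicate_sub_pages_alt all_sub_pages
instance (all_sub_pages : List (List (String × String))) (out : List (List (String × String))) : Decidable (Spec_deduplicate_sub_pages all_sub_pages out) := by unfold Spec_deduplicate_sub_pages; infer_instance

-- ===== CLAIM (what is proved, stated in full; the proofs are below) =====
def Claim_equal_deduplicate_sub_pages : Prop := ∀ (all_sub_pages : List (List (String × String))), Dom_deduplicate_sub_pages all_sub_pages → Pre_deduplicate_sub_pages all_sub_pages → Spec_deduplicate_sub_pages all_sub_pages (deduplicate_sub_pages all_sub_pages)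

-- ===== LEMMAS AND PROOFS =====

-- the item-wise refinement from B's bucket dict to A's running-representative dict
def pvF (p : String × List (List (String × String))) : String × List (String × String) :=
  (p.1, pvSelect p.2)

lemma pvSelect_singleton (e : List (String × String)) : pvSelect [e] = e := by
  unfold pvSelect
  cases h : pvHasDesc e <;> simp [List.find?, h]

-- appending one entry to a nonempty bucket changes its selection exactly when
-- A's replacement condition fires
lemma pvSelect_append (g : List (List (String × String))) (sp : List (String × String)) (hg : g ≠ []) :
    pvSelect (g ++ [sp]) =
      if pvGet sp "short_description" ≠ "" ∧ pvGet (pvSelect g) "short_description" = "" then sp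
      else pvSelect g := by
  cases hf : g.find? pvHasDesc with
  | some e =>
    have he : pvHasDesc e = true := List.find?_some hf
    have hsel : pvSelect g = e := by unfold pvSelect; rw [hf]
    have hdesc : pvGet e "short_description" ≠ "" := by
      simpa [pvHasDesc] using he
    rw [hsel, if_neg (by tauto)]
    unfold pvSelect
    rw [List.find?_append, hf]
    rfl
  | none =>
    have hall : ∀ x ∈ g, pvHasDesc x = false := by
      intro x hx; simpa using List.find?_eq_none.mp hf x hx
    have hsel : pvSelect g = g.headD [] := by unfold pvSelect; rw [hf]
    have hhd : pvGet (g.headD []) "short_description" = "" := by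
      have : g.headD [] ∈ g := by
        cases g with
        | nil => exact absurd rfl hg
        | cons a t => simp
      simpa [pvHasDesc] using hall _ this
    cases hd : pvHasDesc sp with
    | true =>
      have : pvGet sp "short_description" ≠ "" := by simpa [pvHasDesc] using hd
      rw [hsel, if_pos ⟨this, hhd⟩]
      unfold pvSelect
      rw [List.find?_append, hf]
      simp [List.find?, hd]
    | false =>
      have hsp : pvGet sp "short_description" = "" := by simpa [pvHasDesc] using hd
      rw [if_neg (by tauto), hsel]
      unfold pvSelect
      rw [List.find?_append, hf]
      simp [List.find?, hd]
      cases g with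
      | nil => exact absurd rfl hg
      | cons a t => simp

lemma pvStepB_nodup (G : PySem.Dict String (List (List (String × String))))
    (hnd : G.keys.Nodup) (sp : List (String × String)) : (pvStepB G sp).keys.Nodup :=
  PySem.Dict.nodup_keys_insert _ _ _ hnd

lemma pvStepB_ne_nil (G : PySem.Dict String (List (List (String × String))))
    (hne : ∀ p ∈ G.items, p.2 ≠ []) (sp : List (String × String)) :
    ∀ p ∈ (pvStepB G sp).items, p.2 ≠ [] := by
  intro p hp
  rcases (PySem.Dict.mem_items_insert _ _ _ _).mp hp with h | ⟨h, _⟩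
  · subst h; simp
  · exact hne p h

-- one loop step: A's dict stays the pvF-image of B's bucket dict
lemma pv_step (G : PySem.Dict String (List (List (String × String))))
    (hnd : G.keys.Nodup) (hne : ∀ p ∈ G.items, p.2 ≠ [])
    (sp : List (String × String)) :
    pvStepA (PySem.Dict.mk (G.items.map pvF)) sp = PySem.Dict.mk ((pvStepB G sp).items.map pvF) := by
  set url := pvGet sp "url" with hurl
  set S := PySem.Dict.mk (G.items.map pvF) with hS
  have hkeys : S.keys = G.keys := by
    simp [hS, PySem.Dict.keys, List.map_map, pvF]
  have hndS : S.keys.Nodup := hkeys ▸ hnd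
  have hcont : S.contains url = G.contains url := by
    rw [PySem.Dict.contains_eq_decide_mem_keys, PySem.Dict.contains_eq_decide_mem_keys, hkeys]
  cases hc : G.contains url with
  | false =>
    have hScont : S.contains url = false := hcont.trans hc
    apply PySem.Dict.ext
    have hB : pvStepB G sp = G.insert url [sp] := by
      show G.insert url (G.getD url [] ++ [sp]) = _
      rw [PySem.Dict.getD_of_not_contains _ _ hc]
      rfl
    rw [hB]
    simp only [pvStepA]
    rw [← hurl, hScont]
    rw [if_pos rfl]
    rw [PySem.Dict.items_insert_of_not_contains _ _ hScont,
        PySem.Dict.items_insert_of_not_contains _ _ hc]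
    simp [hS, pvF, pvSelect_singleton]
  | true =>
    -- the bucket g already collected for this url
    obtain ⟨g, hg⟩ : ∃ g, G.get? url = some g := by
      have := PySem.Dict.contains_eq_isSome_get? (d := G) (k := url)
      rw [hc] at this
      exact Option.isSome_iff_exists.mp this.symm
    have hmem : (url, g) ∈ G.items := PySem.Dict.mem_items_of_get?_eq_some _ hg
    have hgne : g ≠ [] := hne _ hmem
    have hgetD : G.getD url [] = g := PySem.Dict.getD_of_get?_eq_some _ _ hg
    have hmemS : (url, pvSelect g) ∈ S.items := by
      rw [hS]
      exact List.mem_map.mpr ⟨(url, g), hmem, rfl⟩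
    have hSgetD : S.getD url [] = pvSelect g := PySem.Dict.getD_of_mem_items _ hmemS hndS []
    have hB : pvStepB G sp = G.insert url (g ++ [sp]) := by
      show G.insert url (G.getD url [] ++ [sp]) = _
      rw [hgetD]
    have huniq : ∀ x, (url, x) ∈ G.items → x = g := by
      intro x hx
      have := PySem.Dict.get?_of_mem_items _ hx hnd
      rw [hg] at this; exact (Option.some_inj.mp this).symm
    have hScont : S.contains url = true := hcont.trans hc
    apply PySem.Dict.ext
    rw [hB, PySem.Dict.items_insert_of_contains _ _ hc]
    simp only [pvStepA]
    rw [← hurl, hScont]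
    rw [if_neg (by simp)]
    by_cases hcond : pvGet sp "short_description" ≠ "" ∧ pvGet (pvSelect g) "short_description" = ""
    · rw [hSgetD, if_pos hcond,
          PySem.Dict.items_insert_of_contains _ _ hScont]
      rw [hS]
      show (G.items.map pvF).map _ = _
      rw [List.map_map, List.map_map]
      apply List.map_congr_left
      intro p hp
      by_cases hp1 : p.1 = url
      · simp only [Function.comp, pvF, hp1, beq_self_eq_true, if_true]
        rw [pvSelect_append g sp hgne, if_pos hcond]
      · simp [Function.comp, pvF, hp1]
    · rw [hSgetD, if_neg hcond]
      rw [hS]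
      show G.items.map pvF = _
      rw [List.map_map]
      apply List.map_congr_left
      intro p hp
      by_cases hp1 : p.1 = url
      · have h2 : p.2 = g := huniq p.2 (by rw [← hp1]; exact hp)
        simp only [Function.comp, pvF, hp1, beq_self_eq_true, if_true]
        rw [h2, pvSelect_append g sp hgne, if_neg hcond]
      · simp [Function.comp, pvF, hp1]

-- loop invariant over the whole list
lemma pv_inv (l : List (List (String × String))) :
    ∀ (G : PySem.Dict String (List (List (String × String)))),
      G.keys.Nodup → (∀ p ∈ G.items, p.2 ≠ []) →
      (l.foldl pvStepA (PySem.Dict.mk (G.items.map pvF))).items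
        = (l.foldl pvStepB G).items.map pvF := by
  induction l with
  | nil => intro G _ _; rfl
  | cons sp l ih =>
    intro G hnd hne
    simp only [List.foldl_cons]
    rw [pv_step G hnd hne sp]
    exact ih (pvStepB G sp) (pvStepB_nodup G hnd sp) (pvStepB_ne_nil G hne sp)

-- ===== VERDICT (by name: the statement is the Claim_ definition above) =====
theorem deduplicate_sub_pages_spec : Claim_equal_deduplicate_sub_pages := by
  intro all _ _
  show deduplicate_sub_pages all = deduplicate_sub_pages_alt all
  unfold deduplicate_sub_pages deduplicate_sub_pages_alt
  have h := pv_inv all PySem.Dict.empty (by simp [pysem]) (by simp [PySem.Dict.empty])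
  simp only [PySem.Dict.values]
  rw [show (PySem.Dict.empty : PySem.Dict String (List (String × String)))
        = PySem.Dict.mk ((PySem.Dict.empty : PySem.Dict String (List (List (String × String)))).items.map pvF) from rfl,
      h, List.map_map, List.map_map]
  rfl
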